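-- pv_equiv track=rewrite | github.com/nobodyzxc/spec-oyente | oyente/draw_cfg.py | draw_long_edge
-- ===== SOURCE A (Python) =====
-- def draw_long_edge(path, edges):
--     path_edges = list(zip(path[:-1], path[1:]))
--     for i, edge in enumerate(edges):
--         (b, e) = edge[0]
--         b, e = int(b), int(e)
--         if (b, e) in path_edges:
--             edges[i][1]['color'] = 'red'
--     return edges
-- ===== SOURCE B (Python) =====
-- def draw_long_edge(path, edges):
--     # One pass over edges builds an index key -> positions, then we walk the
--     # path's consecutive pairs and color only the matching positions.
--     index = {}
--     for i, edge in enumerate(edges):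
--         (b, e) = edge[0]
--         key = (int(b), int(e))
--         index.setdefault(key, []).append(i)
--     for pair in zip(path[:-1], path[1:]):
--         for i in index.get(pair, []):
--             edges[i][1]['color'] = 'red'
--     return edges
-- ===== Notes on version B (the rewrite author's own statement) =====
-- stated objective: faster
-- what changed: Instead of scanning every edge and testing membership in the list of path pairs (a linear scan per edge), B builds a position index keyed by edge endpoints in one pass and then iterates over the path's consecutive pairs, coloring only the indexed positions.
import Mathlib
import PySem

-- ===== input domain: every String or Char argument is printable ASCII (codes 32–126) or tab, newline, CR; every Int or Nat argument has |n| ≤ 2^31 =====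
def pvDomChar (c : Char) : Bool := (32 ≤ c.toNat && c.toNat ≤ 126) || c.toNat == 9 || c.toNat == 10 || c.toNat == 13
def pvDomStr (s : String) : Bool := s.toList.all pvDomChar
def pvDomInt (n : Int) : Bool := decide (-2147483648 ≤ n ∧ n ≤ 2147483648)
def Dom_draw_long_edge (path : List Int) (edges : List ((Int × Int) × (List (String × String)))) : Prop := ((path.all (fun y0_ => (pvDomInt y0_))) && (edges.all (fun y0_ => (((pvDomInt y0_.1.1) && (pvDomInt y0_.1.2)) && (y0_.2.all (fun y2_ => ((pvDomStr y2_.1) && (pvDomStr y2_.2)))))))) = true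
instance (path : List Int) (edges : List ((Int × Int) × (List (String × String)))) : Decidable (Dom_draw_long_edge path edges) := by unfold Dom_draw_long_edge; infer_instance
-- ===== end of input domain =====

-- B replaces A's scan over all edges (with a membership test against the list of
-- path pairs) by a one-pass position index probed along the path; equivalence is
-- about the return value (both Pythons mutate `edges`' attr dicts identically).

-- attrs['color'] = 'red' on an attrs dict represented as List (String × String)
def pvSetColor (a : List (String × String)) : List (String × String) :=
  (PySem.Dict.insert ⟨a⟩ "color" "red").items

-- ===== PORT A =====
def draw_long_edge (path : List Int) (edges : List ((Int × Int) × (List (String × String)))) : List ((Int × Int) × (List (String × String))) :=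
  let path_edges := List.zip (PySem.List.slice path none (some (-1))) (PySem.List.slice path (some 1) none)
  (PySem.List.enumerate edges).foldl
    (fun acc p =>
      let i := p.1
      let edge := p.2
      let b := edge.1.1
      let e := edge.1.2
      if (b, e) ∈ path_edges then
        acc.modify i.toNat (fun ed => (ed.1, pvSetColor ed.2))
      else acc)
    edges

-- ===== PORT B =====
def draw_long_edge_alt (path : List Int) (edges : List ((Int × Int) × (List (String × String)))) : List ((Int × Int) × (List (String × String))) :=
  let index : PySem.Dict (Int × Int) (List Int) :=
    (PySem.List.enumerate edges).foldl
      (fun d p =>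
        let key := (p.2.1.1, p.2.1.2)
        d.modify key [] (fun l => l ++ [p.1]))  -- index.setdefault(key, []).append(i)
      ⟨[]⟩
  (List.zip (PySem.List.slice path none (some (-1))) (PySem.List.slice path (some 1) none)).foldl
    (fun acc pr =>
      (index.getD pr []).foldl
        (fun acc2 i => acc2.modify i.toNat (fun ed => (ed.1, pvSetColor ed.2)))
        acc)
    edges

-- ===== PRECONDITION & SPEC =====
def Spec_draw_long_edge (path : List Int) (edges : List ((Int × Int) × (List (String × String)))) (out : List ((Int × Int) × (List (String × String)))) : Prop := out = draw_long_edge_alt path edges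
instance (path : List Int) (edges : List ((Int × Int) × (List (String × String)))) (out : List ((Int × Int) × (List (String × String)))) : Decidable (Spec_draw_long_edge path edges out) := by unfold Spec_draw_long_edge; infer_instance

-- ===== CLAIM (what is proved, stated in full; the proofs are below) =====
def Claim_equal_draw_long_edge : Prop := ∀ (path : List Int) (edges : List ((Int × Int) × (List (String × String)))), Dom_draw_long_edge path edges → Spec_draw_long_edge path edges (draw_long_edge path edges)

-- ===== LEMMAS AND PROOFS =====

-- abbreviations for the proof
abbrev pvE := (Int × Int) × (List (String × String))
def pvF (ed : pvE) : pvE := (ed.1, pvSetColor ed.2)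
def pvG (P : List (Int × Int)) (ed : pvE) : pvE := if ed.1 ∈ P then pvF ed else ed

theorem pvSetColor_idem (a : List (String × String)) : pvSetColor (pvSetColor a) = pvSetColor a := by
  show (PySem.Dict.insert ⟨(PySem.Dict.insert ⟨a⟩ "color" "red").items⟩ "color" "red").items = _
  rw [show (⟨(PySem.Dict.insert (⟨a⟩ : PySem.Dict String String) "color" "red").items⟩ : PySem.Dict String String) = PySem.Dict.insert ⟨a⟩ "color" "red" from rfl]
  rw [PySem.Dict.insert_insert_self]
  rfl

theorem pvF_idem (x : pvE) : pvF (pvF x) = pvF x := by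
  simp [pvF, pvSetColor_idem]

-- modify at the junction of an append
theorem pv_modify_append (pre : List pvE) (x : pvE) (rs : List pvE) (f : pvE → pvE) :
    (pre ++ x :: rs).modify pre.length f = pre ++ f x :: rs := by
  induction pre with
  | nil => simp [List.modify]
  | cons a t ih => simpa [List.modify] using ih

-- A's fold computes a pointwise map
theorem pvA_fold (P : List (Int × Int)) (rest pre : List pvE) :
    ((PySem.List.enumerate rest (pre.length : Int)).foldl
      (fun acc p => if p.2.1 ∈ P then acc.modify p.1.toNat pvF else acc)
      (pre ++ rest))
    = pre ++ rest.map (pvG P) := by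
  induction rest generalizing pre with
  | nil => simp [PySem.List.enumerate_nil]
  | cons r rs ih =>
    rw [PySem.List.enumerate_cons, List.foldl_cons]
    have hlen : ((pre ++ [pvG P r]).length : Int) = (pre.length : Int) + 1 := by simp
    by_cases h : r.1 ∈ P
    · have hm : (pre ++ r :: rs).modify ((pre.length : Int)).toNat pvF = (pre ++ [pvG P r]) ++ rs := by
        rw [Int.toNat_natCast]
        simp [pv_modify_append, pvG, h]
      simp only [h, if_pos]
      rw [hm, ← hlen, ih]
      simp [pvG, h]
    · simp only [h, ite_false]
      have : (pre ++ r :: rs) = (pre ++ [pvG P r]) ++ rs := by simp [pvG, h]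
      rw [this, ← hlen, ih]
      simp [pvG, h]

-- index characterization
theorem pvIdx_fold (l : List (Int × pvE)) (d : PySem.Dict (Int × Int) (List Int)) (k : Int × Int) :
    ((l.foldl (fun d p => d.modify p.2.1 [] (fun w => w ++ [p.1])) d).getD k [])
    = d.getD k [] ++ ((l.filter (fun p => decide (p.2.1 = k))).map (·.1)) := by
  induction l generalizing d with
  | nil => simp
  | cons p l ih =>
    rw [List.foldl_cons, ih]
    by_cases hk : p.2.1 = k
    · rw [hk, PySem.Dict.getD_modify_self]
      simp [hk]
    · rw [PySem.Dict.getD_modify_of_ne _ _ _ (fun he => hk he.symm)]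
      simp [hk]

-- inner fold of B, pointwise
theorem pvB_inner (js : List Int) (hjs : ∀ i ∈ js, 0 ≤ i) (acc : List pvE) (j : Nat) :
    ((js.foldl (fun a i => a.modify i.toNat pvF) acc))[j]?
    = if (j : Int) ∈ js then acc[j]?.map pvF else acc[j]? := by
  induction js generalizing acc with
  | nil => simp
  | cons i js ih =>
    have hi : 0 ≤ i := hjs i (by simp)
    rw [List.foldl_cons, ih (fun x hx => hjs x (by simp [hx]))]
    have hget : (acc.modify i.toNat pvF)[j]? =
        if (j : Int) = i then acc[j]?.map pvF else acc[j]? := by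
      rw [List.getElem?_modify]
      by_cases hji : (j : Int) = i
      · have : i.toNat = j := by omega
        cases acc[j]? <;> simp [this, hji, pvF]
      · have : i.toNat ≠ j := by omega
        cases acc[j]? <;> simp [this, hji]
    by_cases hji : (j : Int) = i <;> by_cases hmem : (j : Int) ∈ js <;>
      cases hacc : acc[j]? <;>
      simp [hget, hji, hmem, hacc, pvF_idem]

-- outer fold of B, pointwise
theorem pvB_outer (idx : PySem.Dict (Int × Int) (List Int))
    (hidx : ∀ k, ∀ i ∈ idx.getD k [], 0 ≤ i)
    (prs : List (Int × Int)) (acc : List pvE) (j : Nat) :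
    ((prs.foldl (fun a pr => (idx.getD pr []).foldl (fun a2 i => a2.modify i.toNat pvF) a) acc))[j]?
    = if ∃ p ∈ prs, (j : Int) ∈ idx.getD p [] then acc[j]?.map pvF else acc[j]? := by
  induction prs generalizing acc with
  | nil => simp
  | cons pr prs ih =>
    rw [List.foldl_cons, ih]
    by_cases h1 : ∃ p ∈ prs, (j : Int) ∈ idx.getD p [] <;>
      by_cases h2 : (j : Int) ∈ idx.getD pr [] <;>
      cases hacc : acc[j]? <;>
      simp [pvB_inner _ (hidx pr), h1, h2, hacc, pvF_idem]

-- membership in the built index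
theorem pv_mem_idx (edges : List pvE) (p : Int × Int) (j : Nat) :
    ((j : Int) ∈ ((PySem.List.enumerate edges).foldl
        (fun d q => d.modify q.2.1 [] (fun w => w ++ [q.1])) (⟨[]⟩ : PySem.Dict (Int × Int) (List Int))).getD p [])
    ↔ ∃ h : j < edges.length, edges[j].1 = p := by
  rw [pvIdx_fold]
  simp only [List.mem_append, List.mem_map, List.mem_filter]
  constructor
  · rintro (h | ⟨q, ⟨hq, hkey⟩, hfst⟩)
    · simp [PySem.Dict.getD, PySem.Dict.get?] at h
    · obtain ⟨k, hk, rfl⟩ := (PySem.List.mem_enumerate_iff _ _ _).mp hq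
      simp only [decide_eq_true_eq] at hkey
      have hjk : k = j := by
        have : ((0 : Int) + k) = (j : Int) := hfst
        omega
      subst hjk
      exact ⟨hk, hkey⟩
  · rintro ⟨h, hkey⟩
    right
    refine ⟨((0 : Int) + j, edges[j]), ⟨?_, by simpa using hkey⟩, by simp⟩
    exact (PySem.List.mem_enumerate_iff _ _ _).mpr ⟨j, h, rfl⟩

-- nonnegativity of indexed positions
theorem pv_idx_nonneg (edges : List pvE) (p : Int × Int) :
    ∀ i ∈ ((PySem.List.enumerate edges).foldl
        (fun d q => d.modify q.2.1 [] (fun w => w ++ [q.1])) (⟨[]⟩ : PySem.Dict (Int × Int) (List Int))).getD p [], 0 ≤ i := by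
  intro i hi
  rw [pvIdx_fold] at hi
  simp only [List.mem_append, List.mem_map, List.mem_filter] at hi
  rcases hi with h | ⟨q, ⟨hq, _⟩, hfst⟩
  · simp [PySem.Dict.getD, PySem.Dict.get?] at h
  · obtain ⟨k, hk, rfl⟩ := (PySem.List.mem_enumerate_iff _ _ _).mp hq
    omega

-- ===== VERDICT (by name: the statement is the Claim_ definition above) =====
theorem draw_long_edge_spec : Claim_equal_draw_long_edge := by
  intro path edges _
  unfold Spec_draw_long_edge draw_long_edge draw_long_edge_alt
  simp only [Prod.mk.eta]
  set P := List.zip (PySem.List.slice path none (some (-1))) (PySem.List.slice path (some 1) none) with hP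
  have hA : (PySem.List.enumerate edges).foldl
      (fun acc p => if p.2.1 ∈ P then acc.modify p.1.toNat (fun ed => (ed.1, pvSetColor ed.2)) else acc)
      edges = edges.map (pvG P) := by
    have := pvA_fold P edges []
    simpa [pvF] using this
  rw [hA]
  apply Eq.symm
  apply List.ext_getElem?
  intro j
  rw [show (fun (acc2 : List pvE) (i : Int) => acc2.modify i.toNat (fun ed => (ed.1, pvSetColor ed.2)))
      = (fun acc2 i => acc2.modify i.toNat pvF) from rfl]
  rw [pvB_outer _ (fun k => pv_idx_nonneg edges k) P edges j]
  by_cases hj : j < edges.length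
  · have hmem : (∃ p ∈ P, (j : Int) ∈ ((PySem.List.enumerate edges).foldl
        (fun (d : PySem.Dict (Int × Int) (List Int)) q => d.modify q.2.1 [] (fun w => w ++ [q.1])) ⟨[]⟩).getD p []) ↔ edges[j].1 ∈ P := by
      constructor
      · rintro ⟨p, hpP, hp⟩
        obtain ⟨_, hkey⟩ := (pv_mem_idx edges p j).mp hp
        rwa [hkey]
      · intro hin
        exact ⟨edges[j].1, hin, (pv_mem_idx edges edges[j].1 j).mpr ⟨hj, rfl⟩⟩
    rw [List.getElem?_map]
    by_cases hin : edges[j].1 ∈ P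
    · simp [hmem, hin, List.getElem?_eq_getElem hj, pvG]
    · simp [hmem, hin, List.getElem?_eq_getElem hj, pvG]
  · have hnone : edges[j]? = none := by
      rw [List.getElem?_eq_none_iff]; omega
    simp [hnone]
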